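-- pv_equiv track=rewrite | github.com/Isobel-nixon/mapfModel | initialPaths/main.py | get_dists
-- ===== SOURCE A (Python) =====
-- def get_dists(paths, targets, dummy):
--     dists = []
--     time =0
--     for agent in range(len(paths)):
--         agent_dists = []
--         for location in paths[agent]:
--             if not (location == targets[agent] or location == dummy):
--                 agent_dists.append(1)
--             else:
--                 agent_dists.append(0)
--             time += sum(agent_dists)
--         dists.append(agent_dists)
--     return dists, time
-- ===== SOURCE B (Python) =====
-- def get_dists(paths, targets, dummy):
--     # Running prefix sum per agent instead of re-summing the row each step: O(total_len) vs A's O(total_len^2).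
--     dists = []
--     time = 0
--     for i, path in enumerate(paths):
--         row = []
--         s = 0
--         for loc in path:
--             d = 0 if loc == targets[i] or loc == dummy else 1
--             row.append(d)
--             s += d
--             time += s
--         dists.append(row)
--     return dists, time
-- ===== Notes on version B (the rewrite author's own statement) =====
-- stated objective: faster
-- what changed: B keeps a running prefix sum per agent and adds it to time, instead of recomputing sum(agent_dists) on every appended element, turning the quadratic inner accumulation into a single pass.
-- outside the precondition, e.g. on get_dists([[1], [2]], [1], 0): A raises IndexError, B raises IndexError
import Mathlib
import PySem

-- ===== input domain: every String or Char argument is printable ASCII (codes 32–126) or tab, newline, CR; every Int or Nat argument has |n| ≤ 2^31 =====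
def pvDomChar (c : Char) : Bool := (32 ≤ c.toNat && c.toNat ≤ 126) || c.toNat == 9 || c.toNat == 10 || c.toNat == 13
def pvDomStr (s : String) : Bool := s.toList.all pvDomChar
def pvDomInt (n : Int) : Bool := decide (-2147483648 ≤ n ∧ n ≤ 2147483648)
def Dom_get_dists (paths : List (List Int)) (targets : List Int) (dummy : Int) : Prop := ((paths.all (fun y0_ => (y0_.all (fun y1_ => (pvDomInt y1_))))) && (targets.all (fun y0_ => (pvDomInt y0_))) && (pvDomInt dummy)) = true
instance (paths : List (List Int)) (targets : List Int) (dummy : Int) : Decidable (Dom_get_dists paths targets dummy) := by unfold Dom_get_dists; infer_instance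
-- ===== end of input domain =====

-- B replaces A's per-step sum(agent_dists) recomputation by a running prefix sum per agent (asymptotically faster).

-- ===== PORT A =====
-- inner loop: for location in paths[agent]: append 0/1; time += sum(agent_dists)
def aLoop (targets : List Int) (dummy : Int) (agent : Nat) :
    List Int → List Int × Int → List Int × Int
  | [], st => st
  | loc :: rest, (row, time) =>
    let row' := if ¬(loc = PySem.List.pyGetD targets (Int.ofNat agent) 0 ∨ loc = dummy)
                then row ++ [(1 : Int)] else row ++ [(0 : Int)]
    aLoop targets dummy agent rest (row', time + row'.sum)

-- outer loop: for agent in range(len(paths)) (recursion over paths with the agent counter)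
def aMain (targets : List Int) (dummy : Int) :
    List (List Int) → Nat → List (List Int) × Int → List (List Int) × Int
  | [], _, st => st
  | path :: rest, agent, (dists, time) =>
    let r := aLoop targets dummy agent path ([], time)
    aMain targets dummy rest (agent + 1) (dists ++ [r.1], r.2)

def get_dists (paths : List (List Int)) (targets : List Int) (dummy : Int) :
    List (List Int) × Int :=
  aMain targets dummy paths 0 ([], 0)

-- ===== PORT B =====
-- inner loop of Source B: running sum s, time += s each step
def bRow (targets : List Int) (i : Int) (dummy : Int) :
    List Int → List Int → Int → Int → List Int × Int × Int
  | [], row, s, time => (row, s, time)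
  | loc :: rest, row, s, time =>
    let d : Int := if loc = PySem.List.pyGetD targets i 0 ∨ loc = dummy then 0 else 1
    bRow targets i dummy rest (row ++ [d]) (s + d) (time + (s + d))

def get_dists_alt (paths : List (List Int)) (targets : List Int) (dummy : Int) :
    List (List Int) × Int :=
  (PySem.List.enumerate paths 0).foldl
    (fun (st : List (List Int) × Int) ip =>
      let r := bRow targets ip.1 dummy ip.2 [] 0 st.2
      (st.1 ++ [r.1], r.2.2)) ([], 0)

-- ===== PRECONDITION & SPEC =====
-- Pre_ excludes exactly the inputs where Python A raises IndexError: an agent index with a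
-- nonempty path but no corresponding target (both ports then read a default 0 via pyGetD).
def Pre_get_dists (paths : List (List Int)) (targets : List Int) (dummy : Int) : Prop :=
  ∀ i : Nat, i < paths.length → paths.getD i [] ≠ [] → i < targets.length
instance (paths : List (List Int)) (targets : List Int) (dummy : Int) : Decidable (Pre_get_dists paths targets dummy) := by unfold Pre_get_dists; infer_instance

def pvWitness_get_dists : List (List Int) × List Int × Int := ([[1, 2, 2], [0, 3]], [2, 3], 0)

def Spec_get_dists (paths : List (List Int)) (targets : List Int) (dummy : Int) (out : List (List Int) × Int) : Prop := out = get_dists_alt paths targets dummy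
instance (paths : List (List Int)) (targets : List Int) (dummy : Int) (out : List (List Int) × Int) : Decidable (Spec_get_dists paths targets dummy out) := by unfold Spec_get_dists; infer_instance

-- ===== CLAIM (what is proved, stated in full; the proofs are below) =====
def Claim_equal_get_dists : Prop := ∀ (paths : List (List Int)) (targets : List Int) (dummy : Int), Dom_get_dists paths targets dummy → Pre_get_dists paths targets dummy → Spec_get_dists paths targets dummy (get_dists paths targets dummy)

-- ===== LEMMAS AND PROOFS =====

-- A's inner loop equals B's inner loop when s carries row.sum.
theorem aLoop_eq_bRow (targets : List Int) (dummy : Int) (agent : Nat) :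
    ∀ (path row : List Int) (s time : Int), s = row.sum →
      aLoop targets dummy agent path (row, time) =
        ((bRow targets (Int.ofNat agent) dummy path row s time).1,
         (bRow targets (Int.ofNat agent) dummy path row s time).2.2) := by
  intro path
  induction path with
  | nil => intro row s time hs; simp [aLoop, bRow]
  | cons loc rest ih =>
    intro row s time hs
    simp only [aLoop, bRow]
    by_cases h : loc = PySem.List.pyGetD targets (Int.ofNat agent) 0 ∨ loc = dummy
    · have h0 : (row ++ [(0 : Int)]).sum = s + 0 := by simp [hs]
      rw [if_neg (not_not_intro h), if_pos h, h0,
        ih (row ++ [0]) (s + 0) (time + (s + 0)) (by simp [hs])]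
    · have h1 : (row ++ [(1 : Int)]).sum = s + 1 := by simp [hs]
      rw [if_pos h, if_neg h, h1,
        ih (row ++ [1]) (s + 1) (time + (s + 1)) (by simp [hs])]

-- A's outer loop equals B's foldl over enumerate, from any starting agent index.
theorem aMain_eq_fold (targets : List Int) (dummy : Int) :
    ∀ (paths : List (List Int)) (agent : Nat) (dists : List (List Int)) (time : Int),
      aMain targets dummy paths agent (dists, time) =
        (PySem.List.enumerate paths (Int.ofNat agent)).foldl
          (fun (st : List (List Int) × Int) ip =>
            let r := bRow targets ip.1 dummy ip.2 [] 0 st.2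
            (st.1 ++ [r.1], r.2.2)) (dists, time) := by
  intro paths
  induction paths with
  | nil => intro agent dists time; simp [aMain, PySem.List.enumerate_nil]
  | cons path rest ih =>
    intro agent dists time
    rw [PySem.List.enumerate_cons]
    simp only [aMain, List.foldl_cons]
    rw [aLoop_eq_bRow targets dummy agent path [] 0 time rfl]
    have hcast : (Int.ofNat agent) + 1 = Int.ofNat (agent + 1) := by norm_cast
    rw [hcast, ih]

-- ===== VERDICT (by name: the statement is the Claim_ definition above) =====
theorem get_dists_spec : Claim_equal_get_dists := by
  intro paths targets dummy _ _
  unfold Spec_get_dists get_dists get_dists_alt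
  exact aMain_eq_fold targets dummy paths 0 [] 0
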